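-- pv_equiv track=rewrite | github.com/ymygogogo/dingo-aurora | dingoops/jobs/cluster_status_syncer.py | determine_cluster_status
-- ===== SOURCE A (Python) =====
-- def determine_cluster_status(node_statuses, instance_statuses, current_status):
--     """
--     根据节点和实例的状态确定集群的状态
--
--     参数:
--     node_statuses (list): 节点状态列表
--     instance_statuses (list): 实例状态列表
--     current_status (str): 当前集群状态
--
--     返回:
--     str: 确定的集群状态
--     """
--     # 如果没有节点或实例，保持当前状态
--     if not node_statuses and not instance_statuses:
--         return current_status
--
--     # 如果有任何失败状态
--     if 'error' in node_statuses or 'error' in instance_statuses or 'failed' in node_statuses or 'failed' in instance_statuses: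
--         return 'error'
--
--     # 如果全部都是运行状态
--     if all(status == 'running' for status in node_statuses) and all(status == 'running' for status in instance_statuses):
--         return 'running'
--
--     # 如果有创建中的状态
--     if 'creating' in node_statuses or 'creating' in instance_statuses:
--         return 'creating'
--
--     # 如果有删除中的状态
--     if 'deleting' in node_statuses or 'deleting' in instance_statuses:
--         return 'deleting'
--
--     # 默认保持当前状态
--     return current_status
-- ===== SOURCE B (Python) =====
-- def determine_cluster_status(node_statuses, instance_statuses, current_status):
--     saw_any = False
--     has_error = has_failed = has_creating = has_deleting = False
--     all_running = True
--     for s in node_statuses + instance_statuses: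
--         saw_any = True
--         if s == 'error':
--             has_error = True
--         elif s == 'failed':
--             has_failed = True
--         elif s == 'creating':
--             has_creating = True
--         elif s == 'deleting':
--             has_deleting = True
--         if s != 'running':
--             all_running = False
--     if not saw_any:
--         return current_status
--     if has_error or has_failed:
--         return 'error'
--     if all_running:
--         return 'running'
--     if has_creating:
--         return 'creating'
--     if has_deleting:
--         return 'deleting'
--     return current_status
-- ===== Notes on version B (the rewrite author's own statement) =====
-- stated objective: alternative
-- what changed: Replaces A's six separate membership scans and two all() passes (up to 8 traversals) with one single pass over the concatenated lists maintaining boolean flags, followed by the same priority cascade on the flags.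
import Mathlib
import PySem

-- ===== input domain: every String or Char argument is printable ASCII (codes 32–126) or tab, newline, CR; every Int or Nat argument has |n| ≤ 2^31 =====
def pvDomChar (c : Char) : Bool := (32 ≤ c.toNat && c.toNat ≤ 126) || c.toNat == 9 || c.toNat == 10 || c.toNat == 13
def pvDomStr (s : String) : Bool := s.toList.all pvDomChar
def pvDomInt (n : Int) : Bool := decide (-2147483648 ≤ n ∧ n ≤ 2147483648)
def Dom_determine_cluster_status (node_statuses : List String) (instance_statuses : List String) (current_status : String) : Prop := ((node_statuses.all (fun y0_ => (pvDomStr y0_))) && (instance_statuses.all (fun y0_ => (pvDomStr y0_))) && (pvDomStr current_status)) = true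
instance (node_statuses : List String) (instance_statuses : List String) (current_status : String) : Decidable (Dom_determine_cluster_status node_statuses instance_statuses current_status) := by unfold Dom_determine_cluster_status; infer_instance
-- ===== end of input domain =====

-- B replaces A's six membership scans and two all() passes with one single pass over the
-- concatenated lists maintaining flags, then the same priority cascade (objective: alternative).

-- ===== PORT A =====
def determine_cluster_status (node_statuses : List String) (instance_statuses : List String) (current_status : String) : String :=
  if node_statuses.isEmpty && instance_statuses.isEmpty then current_status
  else if node_statuses.contains "error" || instance_statuses.contains "error"
       || node_statuses.contains "failed" || instance_statuses.contains "failed" then "error"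
  else if node_statuses.all (fun status => status == "running")
       && instance_statuses.all (fun status => status == "running") then "running"
  else if node_statuses.contains "creating" || instance_statuses.contains "creating" then "creating"
  else if node_statuses.contains "deleting" || instance_statuses.contains "deleting" then "deleting"
  else current_status

-- ===== PORT B =====
-- one step of B's loop body: flags are (saw_any, has_error, has_failed, has_creating, has_deleting, all_running)
def dcsStep (st : Bool × Bool × Bool × Bool × Bool × Bool) (s : String) :
    Bool × Bool × Bool × Bool × Bool × Bool :=
  match st with
  | (_, e, f, c, d, r) =>
    if s == "error" then (true, true, f, c, d, r && (s == "running"))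
    else if s == "failed" then (true, e, true, c, d, r && (s == "running"))
    else if s == "creating" then (true, e, f, true, d, r && (s == "running"))
    else if s == "deleting" then (true, e, f, c, true, r && (s == "running"))
    else (true, e, f, c, d, r && (s == "running"))

def determine_cluster_status_alt (node_statuses : List String) (instance_statuses : List String) (current_status : String) : String :=
  match (node_statuses ++ instance_statuses).foldl dcsStep (false, false, false, false, false, true) with
  | (sawAny, hasError, hasFailed, hasCreating, hasDeleting, allRunning) =>
    if !sawAny then current_status
    else if hasError || hasFailed then "error"
    else if allRunning then "running"
    else if hasCreating then "creating"
    else if hasDeleting then "deleting"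
    else current_status

-- ===== PRECONDITION & SPEC =====
def Spec_determine_cluster_status (node_statuses : List String) (instance_statuses : List String) (current_status : String) (out : String) : Prop := out = determine_cluster_status_alt node_statuses instance_statuses current_status
instance (node_statuses : List String) (instance_statuses : List String) (current_status : String) (out : String) : Decidable (Spec_determine_cluster_status node_statuses instance_statuses current_status out) := by unfold Spec_determine_cluster_status; infer_instance

-- ===== CLAIM (what is proved, stated in full; the proofs are below) =====
def Claim_equal_determine_cluster_status : Prop := ∀ (node_statuses : List String) (instance_statuses : List String) (current_status : String), Dom_determine_cluster_status node_statuses instance_statuses current_status → Spec_determine_cluster_status node_statuses instance_statuses current_status (determine_cluster_status node_statuses instance_statuses current_status)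

-- ===== LEMMAS AND PROOFS =====

-- the fold computes, componentwise, the obvious "or over the list" / "and over the list" flags
theorem dcs_foldl_char (l : List String) (saw e f c d r : Bool) :
    l.foldl dcsStep (saw, e, f, c, d, r)
      = (saw || !l.isEmpty,
         e || l.contains "error",
         f || l.contains "failed",
         c || l.contains "creating",
         d || l.contains "deleting",
         r && l.all (fun s => s == "running")) := by
  induction l generalizing saw e f c d r with
  | nil => simp
  | cons s t ih =>
      simp only [List.foldl_cons, dcsStep]
      by_cases h1 : s = "error"
      · subst h1; simp [ih]
      · by_cases h2 : s = "failed"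
        · subst h2; simp [ih]
        · by_cases h3 : s = "creating"
          · subst h3; simp [ih]
          · by_cases h4 : s = "deleting"
            · subst h4; simp [ih]
            · have h1' : ¬("error" = s) := fun h => h1 h.symm
              have h2' : ¬("failed" = s) := fun h => h2 h.symm
              have h3' : ¬("creating" = s) := fun h => h3 h.symm
              have h4' : ¬("deleting" = s) := fun h => h4 h.symm
              simp [h1, h2, h3, h4, h1', h2', h3', h4', ih, Bool.and_assoc]

-- ===== VERDICT (by name: the statement is the Claim_ definition above) =====
theorem determine_cluster_status_spec : Claim_equal_determine_cluster_status := by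
  intro ns is cur _
  unfold Spec_determine_cluster_status determine_cluster_status determine_cluster_status_alt
  rw [dcs_foldl_char]
  simp only [Bool.false_or, Bool.true_and, List.contains_append, List.all_append]
  by_cases h0 : ns = [] ∧ is = []
  · obtain ⟨h1, h2⟩ := h0; subst h1; subst h2; simp
  · have hne : ((ns ++ is).isEmpty) = false := by
      cases ns <;> cases is <;> simp_all
    have hA : (ns.isEmpty && is.isEmpty) = false := by
      cases ns <;> cases is <;> simp_all
    rw [hne, hA]
    simp only [Bool.not_false, Bool.false_eq_true, if_false]
    cases h1 : ns.contains "error" <;> cases h2 : is.contains "error" <;>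
      cases h3 : ns.contains "failed" <;> cases h4 : is.contains "failed" <;>
      simp [h1, h2, h3, h4]
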